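-- pv_equiv track=rewrite | github.com/emanspeaks/powerzig | .github/scripts/patch-build-zig-ppc-only.py | inject_stubs
-- ===== SOURCE A (Python) =====
-- STUBS_RELATIVE = '../../.github/stubs/llvm-target-stubs.c'
--
-- LAST_CPP_SOURCE = '"src/zig_clang_cc1as_main.cpp",'
--
-- def inject_stubs(lines, stubs_path):
--     """Insert the stubs file into zig_cpp_sources after the last known entry."""
--     # Determine the path to use in the source: prefer a relative path (cleaner),
--     # fall back to the absolute path passed on the command line.
--     inject_path = STUBS_RELATIVE
--
--     new_lines = []
--     injected = False
--     for line in lines: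
--         new_lines.append(line)
--         if not injected and LAST_CPP_SOURCE in line:
--             # Preserve indentation of the existing entry.
--             indent = len(line) - len(line.lstrip())
--             new_lines.append(' ' * indent + f'"{inject_path}",\n')
--             injected = True
--     return new_lines, injected
-- ===== SOURCE B (Python) =====
-- STUBS_RELATIVE = '../../.github/stubs/llvm-target-stubs.c'
--
-- LAST_CPP_SOURCE = '"src/zig_clang_cc1as_main.cpp",'
--
-- def inject_stubs(lines, stubs_path):
--     """Insert the stubs file into zig_cpp_sources after the last known entry."""
--     i = next((k for k, line in enumerate(lines) if LAST_CPP_SOURCE in line), None)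
--     if i is None:
--         return list(lines), False
--     line = lines[i]
--     indent = len(line) - len(line.lstrip())
--     stub = ' ' * indent + f'"{STUBS_RELATIVE}",\n'
--     return lines[:i + 1] + [stub] + lines[i + 1:], True
-- ===== Notes on version B (the rewrite author's own statement) =====
-- stated objective: simpler
-- what changed: Replaces the accumulate-with-flag loop by finding the first matching index and splicing the stub line in by slicing (no per-line appends, no injected flag threaded through the loop).
import Mathlib
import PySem

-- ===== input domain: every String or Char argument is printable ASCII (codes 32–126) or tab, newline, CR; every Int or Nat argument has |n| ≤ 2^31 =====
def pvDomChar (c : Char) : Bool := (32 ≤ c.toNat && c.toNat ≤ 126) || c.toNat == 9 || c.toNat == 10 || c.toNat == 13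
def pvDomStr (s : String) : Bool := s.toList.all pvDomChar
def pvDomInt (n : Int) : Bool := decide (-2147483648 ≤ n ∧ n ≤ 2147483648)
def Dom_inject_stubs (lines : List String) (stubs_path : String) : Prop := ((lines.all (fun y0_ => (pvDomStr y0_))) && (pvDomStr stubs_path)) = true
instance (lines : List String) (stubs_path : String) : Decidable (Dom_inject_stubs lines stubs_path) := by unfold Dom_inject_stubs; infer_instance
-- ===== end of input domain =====

-- B finds the first matching line and splices the stub in by slicing, instead of A's
-- append-every-line loop with an injected flag; objective: simpler.


-- module constants
def pvSTUBS_RELATIVE : String := "../../.github/stubs/llvm-target-stubs.c"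
def pvLAST_CPP_SOURCE : String := "\"src/zig_clang_cc1as_main.cpp\","

-- ' ' * indent + f'"{inject_path}",\n'  with indent = len(line) - len(line.lstrip())
def pvStub (line : String) : String :=
  let indent : Int := PySem.Str.len line - PySem.Str.len (PySem.Str.lstrip line)
  String.ofList (List.replicate indent.toNat ' ') ++ "\"" ++ pvSTUBS_RELATIVE ++ "\",\n"

-- ===== PORT A =====
-- the body of A's for-loop over state (new_lines, injected)
def pvStep (st : List String × Bool) (line : String) : List String × Bool :=
  let new_lines := st.1 ++ [line]
  if !st.2 && PySem.Str.isIn pvLAST_CPP_SOURCE line then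
    (new_lines ++ [pvStub line], true)
  else
    (new_lines, st.2)

def inject_stubs (lines : List String) (stubs_path : String) : List String × Bool :=
  lines.foldl pvStep ([], false)

-- ===== PORT B =====
def inject_stubs_alt (lines : List String) (stubs_path : String) : List String × Bool :=
  match List.findIdx? (fun line => PySem.Str.isIn pvLAST_CPP_SOURCE line) lines with
  | none => (lines, false)
  | some i => (lines.take (i + 1) ++ [pvStub (lines.getD i "")] ++ lines.drop (i + 1), true)

-- ===== PRECONDITION & SPEC =====
def Spec_inject_stubs (lines : List String) (stubs_path : String) (out : List String × Bool) : Prop := out = inject_stubs_alt lines stubs_path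
instance (lines : List String) (stubs_path : String) (out : List String × Bool) : Decidable (Spec_inject_stubs lines stubs_path out) := by unfold Spec_inject_stubs; infer_instance

-- ===== CLAIM (what is proved, stated in full; the proofs are below) =====
def Claim_equal_inject_stubs : Prop := ∀ (lines : List String) (stubs_path : String), Dom_inject_stubs lines stubs_path → Spec_inject_stubs lines stubs_path (inject_stubs lines stubs_path)

-- ===== LEMMAS AND PROOFS =====

-- once injected, A's loop just appends the remaining lines
theorem pvFold_true (lines : List String) (acc : List String) :
    lines.foldl pvStep (acc, true) = (acc ++ lines, true) := by
  induction lines generalizing acc with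
  | nil => simp
  | cons l ls ih =>
    rw [List.foldl_cons, show pvStep (acc, true) l = (acc ++ [l], true) by simp [pvStep], ih]
    simp

-- before injection, A's loop realizes B's find-and-splice
theorem pvFold_false (lines : List String) (acc : List String) :
    lines.foldl pvStep (acc, false) =
    match List.findIdx? (fun line => PySem.Str.isIn pvLAST_CPP_SOURCE line) lines with
    | none => (acc ++ lines, false)
    | some i => (acc ++ (lines.take (i + 1) ++ [pvStub (lines.getD i "")] ++ lines.drop (i + 1)), true) := by
  induction lines generalizing acc with
  | nil => simp
  | cons l ls ih =>
    by_cases h : PySem.Chars.isIn pvLAST_CPP_SOURCE.toList l.toList = true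
    · rw [List.foldl_cons,
        show pvStep (acc, false) l = (acc ++ [l] ++ [pvStub l], true) by simp [pvStep, PySem.Str.isIn, h],
        pvFold_true]
      simp [List.findIdx?_cons, h]
    · rw [List.foldl_cons,
        show pvStep (acc, false) l = (acc ++ [l], false) by simp [pvStep, PySem.Str.isIn, h],
        ih]
      cases hf : List.findIdx? (fun line => PySem.Chars.isIn pvLAST_CPP_SOURCE.toList line.toList) ls with
      | none => simp [List.findIdx?_cons, h, hf]
      | some i => simp [List.findIdx?_cons, h, hf]

-- ===== VERDICT (by name: the statement is the Claim_ definition above) =====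
theorem inject_stubs_spec : Claim_equal_inject_stubs := by
  intro lines stubs_path _
  show inject_stubs lines stubs_path = inject_stubs_alt lines stubs_path
  unfold inject_stubs inject_stubs_alt
  rw [pvFold_false]
  cases List.findIdx? (fun line => PySem.Str.isIn pvLAST_CPP_SOURCE line) lines <;> simp
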